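-- pv_equiv track=rewrite | github.com/HoodStar1/PrepaC | app/app.py | summarize_clean_logs
-- ===== SOURCE A (Python) =====
-- def summarize_clean_logs(logs):
--     summary = {
--         "total_actions": len(logs),
--         "dry_runs": 0,
--         "real_runs": 0,
--         "successes": 0,
--         "failures": 0,
--         "bytes_total": 0,
--         "bytes_dry_run": 0,
--         "bytes_real": 0,
--         "recycle_actions": 0,
--     }
--     for l in logs:
--         is_dry = str(l.get("dry_run", "")).lower() == "true"
--         is_success = str(l.get("success", "")).lower() == "true"
--         size = int(l.get("size_bytes", 0) or 0)
--         msg = str(l.get("message","")).lower()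
--         summary["bytes_total"] += size
--         if "recycle" in msg:
--             summary["recycle_actions"] += 1
--         if is_dry:
--             summary["dry_runs"] += 1
--             summary["bytes_dry_run"] += size
--         else:
--             summary["real_runs"] += 1
--             summary["bytes_real"] += size
--         if is_success:
--             summary["successes"] += 1
--         else:
--             summary["failures"] += 1
--     return summary
-- ===== SOURCE B (Python) =====
-- def summarize_clean_logs(logs):
--     def truthy(l, k):
--         return str(l.get(k, "")).lower() == "true"
--
--     def size_of(l):
--         return int(l.get("size_bytes", 0) or 0)
--
--     n = len(logs)
--     dry = sum(1 for l in logs if truthy(l, "dry_run"))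
--     succ = sum(1 for l in logs if truthy(l, "success"))
--     bytes_total = sum(size_of(l) for l in logs)
--     bytes_dry = sum(size_of(l) for l in logs if truthy(l, "dry_run"))
--     bytes_real = sum(size_of(l) for l in logs if not truthy(l, "dry_run"))
--     recycle = sum(1 for l in logs
--                   if "recycle" in str(l.get("message", "")).lower())
--     return {
--         "total_actions": n,
--         "dry_runs": dry,
--         "real_runs": n - dry,
--         "successes": succ,
--         "failures": n - succ,
--         "bytes_total": bytes_total,
--         "bytes_dry_run": bytes_dry,
--         "bytes_real": bytes_real,
--         "recycle_actions": recycle,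
--     }
-- ===== Notes on version B (the rewrite author's own statement) =====
-- stated objective: idiomatic
-- what changed: The single fused loop mutating a summary dict is replaced by independent reductions (len, conditional sums/counts per field, with real_runs and failures derived as complements), and the result dict is assembled once from those values.
import Mathlib
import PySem

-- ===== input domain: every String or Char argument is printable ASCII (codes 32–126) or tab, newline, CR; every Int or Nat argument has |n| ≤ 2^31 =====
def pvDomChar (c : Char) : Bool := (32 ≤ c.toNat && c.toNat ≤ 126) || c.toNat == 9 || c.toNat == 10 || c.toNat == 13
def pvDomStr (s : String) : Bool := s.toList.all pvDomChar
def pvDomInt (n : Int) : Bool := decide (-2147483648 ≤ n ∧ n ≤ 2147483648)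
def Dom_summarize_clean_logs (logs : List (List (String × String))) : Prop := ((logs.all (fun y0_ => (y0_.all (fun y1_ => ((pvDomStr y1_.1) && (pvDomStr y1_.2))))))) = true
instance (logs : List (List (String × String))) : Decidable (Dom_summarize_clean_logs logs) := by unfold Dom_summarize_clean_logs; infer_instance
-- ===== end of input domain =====

-- B replaces A's single fused loop over a mutated summary dict by independent per-field
-- reductions (counts and conditional sums, complements by subtraction); same values, same cost.

-- ===== PORT A =====
-- loop body of A's for-loop (the mutated dict is the fold state)
def pvAStep (summary : PySem.Dict String Int) (l : List (String × String)) : PySem.Dict String Int :=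
  let d := PySem.Dict.ofList l
  let is_dry := PySem.Str.lower (d.getD "dry_run" "") == "true"
  let is_success := PySem.Str.lower (d.getD "success" "") == "true"
  -- int(l.get("size_bytes", 0) or 0): "" is falsy → 0; a non-int string raises ValueError (excluded by Pre_)
  let size : Int := match d.get? "size_bytes" with
    | none => 0
    | some s => if s == "" then 0 else (PySem.Int.ofStr? s).getD 0
  let msg := PySem.Str.lower (d.getD "message" "")
  let summary := summary.modify "bytes_total" 0 (· + size)
  let summary := if PySem.Str.isIn "recycle" msg then summary.modify "recycle_actions" 0 (· + 1) else summary
  let summary := if is_dry then (summary.modify "dry_runs" 0 (· + 1)).modify "bytes_dry_run" 0 (· + size)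
                 else (summary.modify "real_runs" 0 (· + 1)).modify "bytes_real" 0 (· + size)
  if is_success then summary.modify "successes" 0 (· + 1) else summary.modify "failures" 0 (· + 1)

def summarize_clean_logs (logs : List (List (String × String))) : List (String × Int) :=
  let summary : PySem.Dict String Int := PySem.Dict.mk
    [("total_actions", (logs.length : Int)), ("dry_runs", 0), ("real_runs", 0),
     ("successes", 0), ("failures", 0), ("bytes_total", 0), ("bytes_dry_run", 0),
     ("bytes_real", 0), ("recycle_actions", 0)]
  (logs.foldl pvAStep summary).items

-- ===== PORT B =====
def pvTruthy (l : List (String × String)) (k : String) : Bool :=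
  PySem.Str.lower ((PySem.Dict.ofList l).getD k "") == "true"

def pvSizeOf (l : List (String × String)) : Int :=
  match (PySem.Dict.ofList l).get? "size_bytes" with
  | none => 0
  | some s => if s == "" then 0 else (PySem.Int.ofStr? s).getD 0

def summarize_clean_logs_alt (logs : List (List (String × String))) : List (String × Int) :=
  let n : Int := logs.length
  let dry : Int := logs.countP (fun l => pvTruthy l "dry_run")
  let succ : Int := logs.countP (fun l => pvTruthy l "success")
  let bytes_total : Int := (logs.map pvSizeOf).sum
  let bytes_dry : Int := ((logs.filter (fun l => pvTruthy l "dry_run")).map pvSizeOf).sum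
  let bytes_real : Int := ((logs.filter (fun l => !pvTruthy l "dry_run")).map pvSizeOf).sum
  let recycle : Int := logs.countP
    (fun l => PySem.Str.isIn "recycle" (PySem.Str.lower ((PySem.Dict.ofList l).getD "message" "")))
  [("total_actions", n), ("dry_runs", dry), ("real_runs", n - dry),
   ("successes", succ), ("failures", n - succ), ("bytes_total", bytes_total),
   ("bytes_dry_run", bytes_dry), ("bytes_real", bytes_real), ("recycle_actions", recycle)]

-- ===== PRECONDITION & SPEC =====
-- Pre_ excludes exactly the records whose "size_bytes" value is a non-empty string that
-- int() cannot parse: there Python A raises ValueError (so does B).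
def Pre_summarize_clean_logs (logs : List (List (String × String))) : Prop :=
  (logs.all (fun l => ((PySem.Dict.ofList l).get? "size_bytes").all
    (fun s => s == "" || (PySem.Int.ofStr? s).isSome))) = true
instance (logs : List (List (String × String))) : Decidable (Pre_summarize_clean_logs logs) := by
  unfold Pre_summarize_clean_logs; infer_instance

def pvWitness_summarize_clean_logs : (List (List (String × String))) :=
  [[("dry_run", "true"), ("size_bytes", "12"), ("message", "Recycle bin purge")], [("success", "true")]]

def Spec_summarize_clean_logs (logs : List (List (String × String))) (out : List (String × Int)) : Prop := out = summarize_clean_logs_alt logs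
instance (logs : List (List (String × String))) (out : List (String × Int)) : Decidable (Spec_summarize_clean_logs logs out) := by unfold Spec_summarize_clean_logs; infer_instance

-- ===== CLAIM (what is proved, stated in full; the proofs are below) =====
def Claim_equal_summarize_clean_logs : Prop := ∀ (logs : List (List (String × String))), Dom_summarize_clean_logs logs → Pre_summarize_clean_logs logs → Spec_summarize_clean_logs logs (summarize_clean_logs logs)

-- ===== LEMMAS AND PROOFS =====

def pvK9 : List String :=
  ["total_actions", "dry_runs", "real_runs", "successes", "failures",
   "bytes_total", "bytes_dry_run", "bytes_real", "recycle_actions"]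

lemma keysModifyK9 (d : PySem.Dict String Int) (k : String) (f : Int → Int)
    (h : d.keys = pvK9) (hm : k ∈ pvK9) : (d.modify k 0 f).keys = pvK9 := by
  rw [PySem.Dict.keys_modify, PySem.Dict.keys_insert_of_contains, h]
  rw [PySem.Dict.contains_eq_decide_mem_keys, h]; simpa using hm

lemma pvAStep_keys (d : PySem.Dict String Int) (h : d.keys = pvK9) (l : List (String × String)) :
    (pvAStep d l).keys = pvK9 := by
  unfold pvAStep
  dsimp only
  split_ifs <;> (repeat first | exact h | apply keysModifyK9 | decide)

lemma pvFold_keys (logs : List (List (String × String))) :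
    ∀ d : PySem.Dict String Int, d.keys = pvK9 → (logs.foldl pvAStep d).keys = pvK9 := by
  induction logs with
  | nil => intro d h; simpa using h
  | cons l ls ih => intro d h; simpa using ih _ (pvAStep_keys d h l)

-- countP of a predicate and of its negation partition the length
lemma pvCountP_split (l : List (List (String × String))) (p : List (String × String) → Bool) :
    l.countP p + l.countP (fun x => !p x) = l.length := by
  induction l with
  | nil => simp
  | cons a t ih => simp only [List.countP_cons]; by_cases h : p a <;> simp [h] <;> omega

lemma pvFold_total (logs : List (List (String × String))) :
    ∀ d : PySem.Dict String Int, (logs.foldl pvAStep d).getD "total_actions" 0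
      = d.getD "total_actions" 0 := by
  induction logs with
  | nil => intro d; simp
  | cons l ls ih =>
    intro d
    rw [List.foldl_cons, ih]
    unfold pvAStep
    dsimp only
    split_ifs <;> simp [PySem.Dict.getD_modify]

lemma pvFold_dry (logs : List (List (String × String))) :
    ∀ d : PySem.Dict String Int, (logs.foldl pvAStep d).getD "dry_runs" 0
      = d.getD "dry_runs" 0 + (logs.countP (fun l => pvTruthy l "dry_run") : Int) := by
  induction logs with
  | nil => intro d; simp
  | cons l ls ih =>
    intro d
    rw [List.foldl_cons, ih, List.countP_cons]
    have hstep : (pvAStep d l).getD "dry_runs" 0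
        = d.getD "dry_runs" 0 + (if pvTruthy l "dry_run" then (1:Int) else 0) := by
      unfold pvAStep pvTruthy
      dsimp only
      split_ifs <;> simp [PySem.Dict.getD_modify]
    rw [hstep]; push_cast; ring

lemma pvFold_real (logs : List (List (String × String))) :
    ∀ d : PySem.Dict String Int, (logs.foldl pvAStep d).getD "real_runs" 0
      = d.getD "real_runs" 0 + (logs.countP (fun l => !pvTruthy l "dry_run") : Int) := by
  induction logs with
  | nil => intro d; simp
  | cons l ls ih =>
    intro d
    rw [List.foldl_cons, ih, List.countP_cons]
    have hstep : (pvAStep d l).getD "real_runs" 0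
        = d.getD "real_runs" 0 + (if !pvTruthy l "dry_run" then (1:Int) else 0) := by
      unfold pvAStep pvTruthy
      dsimp only
      split_ifs <;> simp_all [PySem.Dict.getD_modify]
    rw [hstep]; push_cast; ring

lemma pvFold_succ (logs : List (List (String × String))) :
    ∀ d : PySem.Dict String Int, (logs.foldl pvAStep d).getD "successes" 0
      = d.getD "successes" 0 + (logs.countP (fun l => pvTruthy l "success") : Int) := by
  induction logs with
  | nil => intro d; simp
  | cons l ls ih =>
    intro d
    rw [List.foldl_cons, ih, List.countP_cons]
    have hstep : (pvAStep d l).getD "successes" 0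
        = d.getD "successes" 0 + (if pvTruthy l "success" then (1:Int) else 0) := by
      unfold pvAStep pvTruthy
      dsimp only
      split_ifs <;> simp [PySem.Dict.getD_modify]
    rw [hstep]; push_cast; ring

lemma pvFold_fail (logs : List (List (String × String))) :
    ∀ d : PySem.Dict String Int, (logs.foldl pvAStep d).getD "failures" 0
      = d.getD "failures" 0 + (logs.countP (fun l => !pvTruthy l "success") : Int) := by
  induction logs with
  | nil => intro d; simp
  | cons l ls ih =>
    intro d
    rw [List.foldl_cons, ih, List.countP_cons]
    have hstep : (pvAStep d l).getD "failures" 0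
        = d.getD "failures" 0 + (if !pvTruthy l "success" then (1:Int) else 0) := by
      unfold pvAStep pvTruthy
      dsimp only
      split_ifs <;> simp_all [PySem.Dict.getD_modify]
    rw [hstep]; push_cast; ring

lemma pvFold_bt (logs : List (List (String × String))) :
    ∀ d : PySem.Dict String Int, (logs.foldl pvAStep d).getD "bytes_total" 0
      = d.getD "bytes_total" 0 + (logs.map pvSizeOf).sum := by
  induction logs with
  | nil => intro d; simp
  | cons l ls ih =>
    intro d
    rw [List.foldl_cons, ih, List.map_cons, List.sum_cons]
    have hstep : (pvAStep d l).getD "bytes_total" 0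
        = d.getD "bytes_total" 0 + pvSizeOf l := by
      unfold pvAStep pvSizeOf
      dsimp only
      split_ifs <;> simp [PySem.Dict.getD_modify]
    rw [hstep]; ring

lemma pvFold_bd (logs : List (List (String × String))) :
    ∀ d : PySem.Dict String Int, (logs.foldl pvAStep d).getD "bytes_dry_run" 0
      = d.getD "bytes_dry_run" 0
        + ((logs.filter (fun l => pvTruthy l "dry_run")).map pvSizeOf).sum := by
  induction logs with
  | nil => intro d; simp
  | cons l ls ih =>
    intro d
    rw [List.foldl_cons, ih, List.filter_cons]
    have hstep : (pvAStep d l).getD "bytes_dry_run" 0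
        = d.getD "bytes_dry_run" 0 + (if pvTruthy l "dry_run" then pvSizeOf l else 0) := by
      unfold pvAStep pvTruthy pvSizeOf
      dsimp only
      split_ifs <;> simp [PySem.Dict.getD_modify]
    rw [hstep]
    by_cases h : pvTruthy l "dry_run"
    · simp [h]; ring
    · simp [h]

lemma pvFold_br (logs : List (List (String × String))) :
    ∀ d : PySem.Dict String Int, (logs.foldl pvAStep d).getD "bytes_real" 0
      = d.getD "bytes_real" 0
        + ((logs.filter (fun l => !pvTruthy l "dry_run")).map pvSizeOf).sum := by
  induction logs with
  | nil => intro d; simp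
  | cons l ls ih =>
    intro d
    rw [List.foldl_cons, ih, List.filter_cons]
    have hstep : (pvAStep d l).getD "bytes_real" 0
        = d.getD "bytes_real" 0 + (if !pvTruthy l "dry_run" then pvSizeOf l else 0) := by
      unfold pvAStep pvTruthy pvSizeOf
      dsimp only
      split_ifs <;> simp_all [PySem.Dict.getD_modify]
    rw [hstep]
    by_cases h : pvTruthy l "dry_run"
    · simp [h]
    · simp [h]; ring

lemma pvFold_rec (logs : List (List (String × String))) :
    ∀ d : PySem.Dict String Int, (logs.foldl pvAStep d).getD "recycle_actions" 0
      = d.getD "recycle_actions" 0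
        + (logs.countP (fun l => PySem.Str.isIn "recycle"
            (PySem.Str.lower ((PySem.Dict.ofList l).getD "message" ""))) : Int) := by
  induction logs with
  | nil => intro d; simp
  | cons l ls ih =>
    intro d
    rw [List.foldl_cons, ih, List.countP_cons]
    have hstep : (pvAStep d l).getD "recycle_actions" 0
        = d.getD "recycle_actions" 0
          + (if PySem.Str.isIn "recycle" (PySem.Str.lower ((PySem.Dict.ofList l).getD "message" ""))
             then (1:Int) else 0) := by
      unfold pvAStep
      dsimp only
      split_ifs <;> simp [PySem.Dict.getD_modify]
    rw [hstep]; push_cast; ring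

-- ===== VERDICT (by name: the statement is the Claim_ definition above) =====
theorem summarize_clean_logs_spec : Claim_equal_summarize_clean_logs := by
  intro logs _ _
  unfold Spec_summarize_clean_logs summarize_clean_logs summarize_clean_logs_alt
  dsimp only
  set init : PySem.Dict String Int := PySem.Dict.mk
    [("total_actions", (logs.length : Int)), ("dry_runs", 0), ("real_runs", 0),
     ("successes", 0), ("failures", 0), ("bytes_total", 0), ("bytes_dry_run", 0),
     ("bytes_real", 0), ("recycle_actions", 0)] with hinit
  have hik : init.keys = pvK9 := by simp [hinit, pvK9, PySem.Dict.keys_mk]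
  have hk : (logs.foldl pvAStep init).keys = pvK9 := pvFold_keys logs init hik
  have hnd : (logs.foldl pvAStep init).keys.Nodup := by rw [hk]; decide
  rw [PySem.Dict.items_eq_map_keys _ hnd 0, hk]
  simp only [pvK9, List.map_cons, List.map_nil]
  rw [pvFold_total, pvFold_dry, pvFold_real, pvFold_succ, pvFold_fail,
      pvFold_bt, pvFold_bd, pvFold_br, pvFold_rec]
  have h1 := pvCountP_split logs (fun l => pvTruthy l "dry_run")
  have h2 := pvCountP_split logs (fun l => pvTruthy l "success")
  simp [hinit, PySem.Dict.getD_eq_get?_getD, PySem.Dict.get?_mk_cons]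
  constructor <;> omega
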